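-- pv_equiv track=rewrite | github.com/amalrajan/advent-of-code | 2015/06.2.py | solve
-- ===== SOURCE A (Python) =====
-- def sum_brightness(grid):
--     ans = 0
--     for row in grid:
--         ans += sum(row)
--
--     return ans
--
-- def solve(instructions):
--     n = 1000
--     grid = [[0] * n for _ in range(n)]
--
--     score = {
--         0: 1,
--         1: -1,
--         2: 2,
--     }
--
--     for instr_type, from_coord, to_coord in instructions:
--         for i in range(from_coord[0], to_coord[0] + 1):
--             for j in range(from_coord[1], to_coord[1] + 1):
--                 grid[i][j] = max(0, grid[i][j] + score[instr_type])
--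
--     return sum_brightness(grid)
-- ===== SOURCE B (Python) =====
-- def solve(instructions):
--     n = 1000
--     delta = {0: 1, 1: -1, 2: 2}
--     xs = sorted(set([0, n] + [x for _, (x1, _), (x2, _) in instructions for x in (x1, x2 + 1)]))
--     ys = sorted(set([0, n] + [y for _, (_, y1), (_, y2) in instructions for y in (y1, y2 + 1)]))
--     total = 0
--     for a, b in zip(xs, xs[1:]):
--         for c, d in zip(ys, ys[1:]):
--             v = 0
--             for t, (x1, y1), (x2, y2) in instructions:
--                 if x1 <= a <= x2 and y1 <= c <= y2:
--                     v = max(0, v + delta[t])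
--             total += v * (b - a) * (d - c)
--     return total
-- ===== Notes on version B (the rewrite author's own statement) =====
-- stated objective: alternative
-- what changed: Instead of materialising a 1000x1000 grid and updating every covered cell per instruction, B compresses the instruction coordinates into O(m) x- and y-breakpoints, folds the instruction list once per distinct rectangular block (whose cells all share the same history) and adds the representative cell's value times the block area; cost becomes independent of the grid area.
-- outside the precondition, e.g. on solve([(0, (-1, 0), (-1, 0)), (1, (999, 0), (999, 0))]): A returns 0, B returns 1; on solve([(0, (-3, 0), (-2, 1))]): A returns 4, B returns 4
import Mathlib
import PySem

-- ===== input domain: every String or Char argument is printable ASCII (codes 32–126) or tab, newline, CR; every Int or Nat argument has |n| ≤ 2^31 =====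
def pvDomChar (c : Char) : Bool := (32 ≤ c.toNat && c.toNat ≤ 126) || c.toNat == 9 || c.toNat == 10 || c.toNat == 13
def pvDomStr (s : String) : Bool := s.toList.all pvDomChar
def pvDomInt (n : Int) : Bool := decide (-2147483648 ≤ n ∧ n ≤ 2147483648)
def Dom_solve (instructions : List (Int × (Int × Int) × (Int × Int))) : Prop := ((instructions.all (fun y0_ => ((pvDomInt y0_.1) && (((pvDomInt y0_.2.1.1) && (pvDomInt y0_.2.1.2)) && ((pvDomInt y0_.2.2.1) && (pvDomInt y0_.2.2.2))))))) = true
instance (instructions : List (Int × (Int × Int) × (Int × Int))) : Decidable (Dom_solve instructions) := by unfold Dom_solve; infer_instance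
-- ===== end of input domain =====

-- B replaces A's per-cell grid updates by coordinate compression (one instruction fold per
-- distinct rectangular block, weighted by block area); equivalence is proved on Pre_solve, which
-- keeps every empty-rectangle instruction and restricts effective rectangles to the natural
-- domain (type in {0,1,2}, coordinates inside the 1000×1000 grid).

-- ===== PORT A =====
-- Python's `score[instr_type]`; the KeyError for a type outside {0,1,2} (reachable only through a
-- non-empty rectangle, excluded by Pre_solve) makes `getD 0` exact on the admitted inputs.
def pvScore (t : Int) : Int :=
  ((PySem.Dict.ofList [((0 : Int), (1 : Int)), (1, -1), (2, 2)]).get? t).getD 0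

-- Python list indexing on A's lists, which always have length 1000: a negative index wraps by
-- +1000; an index that is still out of range raises IndexError in Python (outside Pre_solve), and
-- the port's setIfInBounds/getD then no-op there.
def pvWrap (i : Int) : Nat := (if i < 0 then i + 1000 else i).toNat

-- one iteration of A's instruction loop: Python mutates `grid[i]` (the row object) cell by cell;
-- ported by threading the row through the inner fold and writing it back.
def pvStepA (grid : Array (Array Int)) (ins : Int × (Int × Int) × (Int × Int)) :
    Array (Array Int) :=
  (PySem.List.pyRange ins.2.1.1 (ins.2.2.1 + 1) 1).foldl (fun grid i =>
    grid.setIfInBounds (pvWrap i)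
      ((PySem.List.pyRange ins.2.1.2 (ins.2.2.2 + 1) 1).foldl
        (fun row j => row.setIfInBounds (pvWrap j) (max 0 (row.getD (pvWrap j) 0 + pvScore ins.1)))
        (grid.getD (pvWrap i) #[]))) grid

def solve (instructions : List (Int × (Int × Int) × (Int × Int))) : Int :=
  let grid : Array (Array Int) := Array.replicate 1000 (Array.replicate 1000 0)
  let grid := instructions.foldl pvStepA grid
  -- sum_brightness
  grid.foldl (fun ans row => ans + row.foldl (fun a x => a + x) 0) 0

-- ===== PORT B =====
-- Python's `delta[t]`; KeyError excluded by Pre_solve exactly as for A.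
def pvDelta (t : Int) : Int :=
  ((PySem.Dict.ofList [((0 : Int), (1 : Int)), (1, -1), (2, 2)]).get? t).getD 0

def solve_alt (instructions : List (Int × (Int × Int) × (Int × Int))) : Int :=
  let n : Int := 1000
  let xs := PySem.List.sorted
    (PySem.Set.ofList (0 :: n :: instructions.flatMap (fun ins => [ins.2.1.1, ins.2.2.1 + 1])))
    (fun x => x) false
  let ys := PySem.List.sorted
    (PySem.Set.ofList (0 :: n :: instructions.flatMap (fun ins => [ins.2.1.2, ins.2.2.2 + 1])))
    (fun x => x) false
  (xs.zip xs.tail).foldl (fun total ab =>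
    (ys.zip ys.tail).foldl (fun total cd =>
      let v := instructions.foldl (fun v ins =>
        if ins.2.1.1 ≤ ab.1 ∧ ab.1 ≤ ins.2.2.1 ∧ ins.2.1.2 ≤ cd.1 ∧ cd.1 ≤ ins.2.2.2
        then max 0 (v + pvDelta ins.1) else v) 0
      total + v * (ab.2 - ab.1) * (cd.2 - cd.1)) total) 0

-- ===== PRECONDITION & SPEC =====
-- Pre_solve admits every instruction whose rectangle is empty on some axis (A touches no cell and
-- returns) and otherwise restricts to the natural domain: type in {0,1,2} (else both versions
-- raise KeyError) and the rectangle inside the 1000×1000 grid — outside it A raises IndexError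
-- except when a negative index in [-1000,-1] silently wraps around, an accidental artefact of
-- A's list indexing which is excluded here.
def Pre_solve (instructions : List (Int × (Int × Int) × (Int × Int))) : Prop :=
  ∀ ins ∈ instructions,
    ins.2.2.1 < ins.2.1.1 ∨ ins.2.2.2 < ins.2.1.2 ∨
    ((ins.1 = 0 ∨ ins.1 = 1 ∨ ins.1 = 2) ∧
      0 ≤ ins.2.1.1 ∧ ins.2.2.1 ≤ 999 ∧ 0 ≤ ins.2.1.2 ∧ ins.2.2.2 ≤ 999)
instance (instructions : List (Int × (Int × Int) × (Int × Int))) : Decidable (Pre_solve instructions) := by unfold Pre_solve; infer_instance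

def pvWitness_solve : (List (Int × (Int × Int) × (Int × Int))) := [(0, (0, 0), (2, 2))]

def Spec_solve (instructions : List (Int × (Int × Int) × (Int × Int))) (out : Int) : Prop := out = solve_alt instructions
instance (instructions : List (Int × (Int × Int) × (Int × Int))) (out : Int) : Decidable (Spec_solve instructions out) := by unfold Spec_solve; infer_instance

-- ===== CLAIM (what is proved, stated in full; the proofs are below) =====
def Claim_equal_solve : Prop := ∀ (instructions : List (Int × (Int × Int) × (Int × Int))), Dom_solve instructions → Pre_solve instructions → Spec_solve instructions (solve instructions)

-- ===== LEMMAS AND PROOFS =====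

-- the per-cell history: fold the instruction list at one cell (i, j), from initial value v0
def pvCellFrom (v0 : Int) (instrs : List (Int × (Int × Int) × (Int × Int))) (i j : Int) : Int :=
  instrs.foldl (fun v ins =>
    if ins.2.1.1 ≤ i ∧ i ≤ ins.2.2.1 ∧ ins.2.1.2 ≤ j ∧ j ≤ ins.2.2.2
    then max 0 (v + pvScore ins.1) else v) v0

def pvCell (instrs : List (Int × (Int × Int) × (Int × Int))) (i j : Int) : Int :=
  pvCellFrom 0 instrs i j

-- the common intermediate form: the grid total as a double sum of per-cell histories
def pvGridSum (instrs : List (Int × (Int × Int) × (Int × Int))) : Int :=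
  ((PySem.List.pyRange 0 1000 1).map (fun i =>
    ((PySem.List.pyRange 0 1000 1).map (fun j => pvCell instrs i j)).sum)).sum

-- ---------- generic array facts ----------

theorem pvGetD_set_self {α : Type} (a : Array α) (i : Nat) (v d : α) (h : i < a.size) :
    (a.setIfInBounds i v).getD i d = v := by
  rw [Array.getD_eq_getD_getElem?, Array.getElem?_setIfInBounds]
  simp [h]

theorem pvGetD_set_ne {α : Type} (a : Array α) (i j : Nat) (v d : α) (h : i ≠ j) :
    (a.setIfInBounds i v).getD j d = a.getD j d := by
  rw [Array.getD_eq_getD_getElem?, Array.getD_eq_getD_getElem?,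
    Array.getElem?_setIfInBounds, if_neg h]

theorem pvSetSelf {α : Type} (a : Array α) (i : Nat) (d : α) :
    a.setIfInBounds i (a.getD i d) = a := by
  by_cases h : i < a.size
  · apply Array.ext
    · exact Array.size_setIfInBounds
    · intro j h1 h2
      rw [Array.getElem_setIfInBounds]
      split
      · next heq => subst heq; simp [Array.getD, h]
      · rfl
  · rw [Array.setIfInBounds, dif_neg h]

theorem pvToList {α : Type} (a : Array α) (d : α) :
    a.toList = (List.range a.size).map (fun i => a.getD i d) := by
  apply List.ext_getElem
  · simp
  · intro i h1 h2
    have hs : i < a.size := by simpa using h1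
    simp only [List.getElem_map, List.getElem_range]
    rw [Array.getElem_toList]
    simp only [Array.getD, hs, dite_true]
    rfl

-- a fold over range(lo, hi) rewriting slot k from its current content (Python-wrap indexing)
def pvSetLoop {α : Type} (f : Int → α → α) (d : α) (lo hi : Int) (a : Array α) : Array α :=
  (PySem.List.pyRange lo hi 1).foldl
    (fun b k => b.setIfInBounds (pvWrap k) (f k (b.getD (pvWrap k) d))) a

theorem pvSetLoopId {α : Type} (d : α) (lo hi : Int) (a : Array α) :
    pvSetLoop (fun _ v => v) d lo hi a = a := by
  unfold pvSetLoop
  induction PySem.List.pyRange lo hi 1 generalizing a with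
  | nil => rfl
  | cons k t ih => rw [List.foldl_cons, pvSetSelf]; exact ih a

theorem pvSetLoop_spec {α : Type} (f : Int → α → α) (d : α) :
    ∀ (n : Nat) (lo hi : Int) (a : Array α), 0 ≤ lo → (hi - lo).toNat = n →
      (pvSetLoop f d lo hi a).size = a.size ∧
      ∀ idx : Nat, idx < a.size →
        (pvSetLoop f d lo hi a).getD idx d =
          if lo ≤ (idx : Int) ∧ (idx : Int) < hi then f idx (a.getD idx d) else a.getD idx d := by
  intro n
  induction n with
  | zero =>
    intro lo hi a hlo hn
    unfold pvSetLoop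
    rw [PySem.List.pyRange_one_eq_nil (by omega)]
    refine ⟨rfl, ?_⟩
    intro idx hidx
    rw [List.foldl_nil, if_neg (by omega)]
  | succ n ih =>
    intro lo hi a hlo hn
    have hlt : lo < hi := by omega
    have hw : pvWrap lo = lo.toNat := by unfold pvWrap; rw [if_neg (by omega)]
    have hstep : pvSetLoop f d lo hi a =
        pvSetLoop f d (lo + 1) hi (a.setIfInBounds (pvWrap lo) (f lo (a.getD (pvWrap lo) d))) := by
      unfold pvSetLoop
      rw [PySem.List.pyRange_one_cons hlt, List.foldl_cons]
    set a' := a.setIfInBounds (pvWrap lo) (f lo (a.getD (pvWrap lo) d)) with ha'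
    have hsz : a'.size = a.size := Array.size_setIfInBounds
    obtain ⟨ih1, ih2⟩ := ih (lo + 1) hi a' (by omega) (by omega)
    constructor
    · rw [hstep, ih1, hsz]
    · intro idx hidx
      rw [hstep, ih2 idx (by omega)]
      by_cases hcase : (idx : Int) = lo
      · have hnat : pvWrap lo = idx := by rw [hw]; omega
        rw [if_neg (by omega), if_pos (by omega)]
        rw [ha', hnat, pvGetD_set_self a idx _ d hidx, hcase]
      · have hne : pvWrap lo ≠ idx := by rw [hw]; omega
        have hg : a'.getD idx d = a.getD idx d := pvGetD_set_ne a (pvWrap lo) idx _ d hne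
        rw [hg]
        split_ifs with h1 h2 h2
        · rfl
        · omega
        · omega
        · rfl

-- one instruction of A, cell by cell, under Pre_solve's per-instruction condition
theorem pvStepA_spec (ins : Int × (Int × Int) × (Int × Int)) (g : Array (Array Int))
    (hins : ins.2.2.1 < ins.2.1.1 ∨ ins.2.2.2 < ins.2.1.2 ∨
      ((ins.1 = 0 ∨ ins.1 = 1 ∨ ins.1 = 2) ∧
        0 ≤ ins.2.1.1 ∧ ins.2.2.1 ≤ 999 ∧ 0 ≤ ins.2.1.2 ∧ ins.2.2.2 ≤ 999)) :
    (pvStepA g ins).size = g.size ∧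
    ∀ i : Nat, i < g.size →
      ((pvStepA g ins).getD i #[]).size = (g.getD i #[]).size ∧
      ∀ j : Nat, j < (g.getD i #[]).size →
        ((pvStepA g ins).getD i #[]).getD j 0 =
          if ins.2.1.1 ≤ (i : Int) ∧ (i : Int) ≤ ins.2.2.1 ∧
             ins.2.1.2 ≤ (j : Int) ∧ (j : Int) ≤ ins.2.2.2
          then max 0 ((g.getD i #[]).getD j 0 + pvScore ins.1)
          else (g.getD i #[]).getD j 0 := by
  have hrw : pvStepA g ins =
      pvSetLoop (fun _ row => pvSetLoop (fun _ v => max 0 (v + pvScore ins.1)) 0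
        ins.2.1.2 (ins.2.2.2 + 1) row) #[] ins.2.1.1 (ins.2.2.1 + 1) g := rfl
  rcases hins with hx | hrest
  · -- empty x-range: the outer loop body never runs
    have hnil : pvStepA g ins = g := by
      unfold pvStepA
      rw [PySem.List.pyRange_one_eq_nil (a := ins.2.1.1) (b := ins.2.2.1 + 1) (by omega)]
      rfl
    rw [hnil]
    exact ⟨rfl, fun i hi => ⟨rfl, fun j hj => by rw [if_neg (by omega)]⟩⟩
  rcases hrest with hy | ⟨-, hx1, hx2, hy1, hy2⟩
  · -- empty y-range: each touched row is rewritten to itself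
    have hinner : (fun (_ : Int) (row : Array Int) =>
        pvSetLoop (fun _ v => max 0 (v + pvScore ins.1)) 0 ins.2.1.2 (ins.2.2.2 + 1) row) =
        (fun _ row => row) := by
      funext k row
      unfold pvSetLoop
      rw [PySem.List.pyRange_one_eq_nil (a := ins.2.1.2) (b := ins.2.2.2 + 1) (by omega)]
      rfl
    rw [hrw, hinner, pvSetLoopId]
    exact ⟨rfl, fun i hi => ⟨rfl, fun j hj => by rw [if_neg (by omega)]⟩⟩
  · -- real rectangle, inside the grid
    obtain ⟨hs, hv⟩ := pvSetLoop_spec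
      (fun _ row => pvSetLoop (fun _ v => max 0 (v + pvScore ins.1)) 0 ins.2.1.2 (ins.2.2.2 + 1) row)
      #[] (ins.2.2.1 + 1 - ins.2.1.1).toNat ins.2.1.1 (ins.2.2.1 + 1) g hx1 rfl
    rw [hrw]
    refine ⟨hs, ?_⟩
    intro i hi
    rw [hv i hi]
    by_cases hcov : ins.2.1.1 ≤ (i : Int) ∧ (i : Int) < ins.2.2.1 + 1
    · rw [if_pos hcov]
      obtain ⟨hs2, hv2⟩ := pvSetLoop_spec (fun _ v => max 0 (v + pvScore ins.1)) 0
        (ins.2.2.2 + 1 - ins.2.1.2).toNat ins.2.1.2 (ins.2.2.2 + 1) (g.getD i #[]) hy1 rfl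
      refine ⟨hs2, ?_⟩
      intro j hj
      rw [hv2 j hj]
      split_ifs with hA hB hB
      · rfl
      · omega
      · omega
      · rfl
    · rw [if_neg hcov]
      refine ⟨rfl, ?_⟩
      intro j hj
      rw [if_neg (by omega)]

-- A's whole instruction loop, cell by cell
theorem pvFoldA :
    ∀ (instrs : List (Int × (Int × Int) × (Int × Int))), Pre_solve instrs →
      ∀ g : Array (Array Int), g.size = 1000 →
        (∀ i : Nat, i < 1000 → (g.getD i #[]).size = 1000) →
        (instrs.foldl pvStepA g).size = 1000 ∧
        (∀ i : Nat, i < 1000 → ((instrs.foldl pvStepA g).getD i #[]).size = 1000) ∧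
        ∀ i j : Nat, i < 1000 → j < 1000 →
          ((instrs.foldl pvStepA g).getD i #[]).getD j 0 =
            pvCellFrom ((g.getD i #[]).getD j 0) instrs (i : Int) (j : Int) := by
  intro instrs
  induction instrs with
  | nil =>
    intro _ g hg hrow
    exact ⟨hg, hrow, fun i j hi hj => rfl⟩
  | cons ins rest ih =>
    intro h g hg hrow
    obtain ⟨hstep1, hstep2⟩ := pvStepA_spec ins g (h ins List.mem_cons_self)
    have hg' : (pvStepA g ins).size = 1000 := by rw [hstep1, hg]
    have hrow' : ∀ i : Nat, i < 1000 → ((pvStepA g ins).getD i #[]).size = 1000 := by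
      intro i hi
      rw [(hstep2 i (by omega)).1, hrow i hi]
    obtain ⟨ra, rb, rc⟩ := ih (fun x hx => h x (List.mem_cons_of_mem _ hx)) (pvStepA g ins) hg' hrow'
    refine ⟨by simpa using ra, by simpa using rb, ?_⟩
    intro i j hi hj
    rw [List.foldl_cons, rc i j hi hj]
    have hcell := (hstep2 i (by omega)).2 j (by rw [hrow i hi]; omega)
    rw [hcell]
    simp only [pvCellFrom, List.foldl_cons]

theorem pvRangeBridge (F : Int → Int) :
    ((PySem.List.pyRange 0 1000 1).map F).sum =
      ((List.range 1000).map (fun k : Nat => F (k : Int))).sum := by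
  rw [PySem.List.pyRange_one, List.map_map]
  refine congrArg List.sum ?_
  apply List.map_congr_left
  intro k _
  simp

theorem lemA (instrs : List (Int × (Int × Int) × (Int × Int))) (h : Pre_solve instrs) :
    solve instrs = pvGridSum instrs := by
  have hg0 : (Array.replicate 1000 (Array.replicate 1000 (0 : Int))).size = 1000 :=
    Array.size_replicate
  have hrow0 : ∀ i : Nat, i < 1000 →
      ((Array.replicate 1000 (Array.replicate 1000 (0 : Int))).getD i #[]).size = 1000 := by
    intro i hi
    simp [Array.getD, hi]
  obtain ⟨hs, hrows, hval⟩ :=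
    pvFoldA instrs h (Array.replicate 1000 (Array.replicate 1000 0)) hg0 hrow0
  have hcell0 : ∀ i j : Nat, i < 1000 → j < 1000 →
      (((Array.replicate 1000 (Array.replicate 1000 (0 : Int))).getD i #[]).getD j 0) = 0 := by
    intro i j hi hj
    simp [Array.getD, hi, hj]
  set res := instrs.foldl pvStepA (Array.replicate 1000 (Array.replicate 1000 0)) with hres
  show res.foldl (fun ans row => ans + row.foldl (fun a x => a + x) 0) 0 = pvGridSum instrs
  rw [← Array.foldl_toList]
  rw [PySem.List.foldl_add res.toList (fun row => row.foldl (fun a x => a + x) 0) 0]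
  rw [pvToList res #[], hs]
  rw [List.map_map]
  unfold pvGridSum
  rw [pvRangeBridge]
  rw [zero_add]
  refine congrArg List.sum ?_
  apply List.map_congr_left
  intro i hi
  have hi' : i < 1000 := List.mem_range.mp hi
  show (res.getD i #[]).foldl (fun a x => a + x) 0 =
    ((PySem.List.pyRange 0 1000 1).map (fun j => pvCell instrs (i : Int) j)).sum
  rw [pvRangeBridge (fun j => pvCell instrs (i : Int) j)]
  rw [← Array.foldl_toList]
  rw [PySem.List.foldl_add _ (fun x => x) 0, zero_add]
  rw [pvToList (res.getD i #[]) 0, hrows i hi']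
  rw [List.map_map]
  refine congrArg List.sum ?_
  apply List.map_congr_left
  intro j hj
  have hj' : j < 1000 := List.mem_range.mp hj
  show (res.getD i #[]).getD j 0 = pvCell instrs (i : Int) (j : Int)
  rw [hval i j hi' hj', hcell0 i j hi' hj']
  rfl

-- ---------- B side ----------

theorem pvMulSum {α : Type} (c : Int) (l : List α) (g : α → Int) :
    c * (l.map g).sum = (l.map (fun x => c * g x)).sum := by
  induction l with
  | nil => simp
  | cons x t ih => simp [mul_add, ih]

theorem pvHeadLe (xs : List Int) (hp : xs.Pairwise (· < ·)) (m : Int) (hm : m ∈ xs) :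
    ∃ hd : Int, xs.head? = some hd ∧ hd ≤ m := by
  cases xs with
  | nil => cases hm
  | cons x t =>
    refine ⟨x, rfl, ?_⟩
    rcases List.mem_cons.mp hm with h | h
    · omega
    · have := (List.pairwise_cons.mp hp).1 m h
      omega

theorem pvLastGe :
    ∀ (xs : List Int), xs.Pairwise (· < ·) → ∀ m : Int, m ∈ xs →
      ∃ lst : Int, xs.getLast? = some lst ∧ m ≤ lst := by
  intro xs
  induction xs with
  | nil => intro _ m hm; cases hm
  | cons x t ih =>
    intro hp m hm
    cases t with
    | nil =>
      rcases List.mem_cons.mp hm with h | h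
      · exact ⟨x, rfl, by omega⟩
      · cases h
    | cons y t' =>
      have hxy : x < y := (List.pairwise_cons.mp hp).1 y List.mem_cons_self
      obtain ⟨lst, hlst, hyl⟩ := ih (List.pairwise_cons.mp hp).2 y List.mem_cons_self
      rw [List.getLast?_cons_cons]
      rcases List.mem_cons.mp hm with h | h
      · exact ⟨lst, hlst, by omega⟩
      · obtain ⟨lst', hlst', hml'⟩ := ih (List.pairwise_cons.mp hp).2 m h
        exact ⟨lst, hlst, by rw [hlst'] at hlst; injection hlst with e; omega⟩

theorem pvZipGap :
    ∀ (xs : List Int), xs.Pairwise (· < ·) → ∀ a b : Int, (a, b) ∈ xs.zip xs.tail →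
      ∀ z ∈ xs, z ≤ a ∨ b ≤ z := by
  intro xs
  induction xs with
  | nil => intro _ a b hab; cases hab
  | cons x t ih =>
    intro hp a b hab z hz
    cases t with
    | nil => cases hab
    | cons y t' =>
      have hzip : (x :: y :: t').zip (x :: y :: t').tail =
          (x, y) :: ((y :: t').zip t') := rfl
      rw [hzip] at hab
      rcases List.mem_cons.mp hab with h | h
      · have ha : a = x := (Prod.mk.injEq _ _ _ _ ▸ h).1
        have hbv : b = y := (Prod.mk.injEq _ _ _ _ ▸ h).2
        subst ha; subst hbv
        rcases List.mem_cons.mp hz with h' | h'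
        · left; omega
        · right
          rcases List.mem_cons.mp h' with h'' | h''
          · omega
          · have := (List.pairwise_cons.mp (List.pairwise_cons.mp hp).2).1 z h''
            omega
      · have hzt : (y :: t').zip ((y :: t').tail) = (y :: t').zip t' := rfl
        have hmem : a ∈ y :: t' := (List.of_mem_zip h).1
        rcases List.mem_cons.mp hz with h' | h'
        · left
          have hxa : x < a := (List.pairwise_cons.mp hp).1 a hmem
          omega
        · exact ih (List.pairwise_cons.mp hp).2 a b (hzt ▸ h) z h'

theorem pvSumBlocks (F : Int → Int) :
    ∀ (xs : List Int), xs.Pairwise (· < ·) →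
      ∀ lo hi : Int, xs.head? = some lo → xs.getLast? = some hi →
      (∀ a b : Int, (a, b) ∈ xs.zip xs.tail → ∀ i : Int, a ≤ i → i < b → F i = F a) →
      ((PySem.List.pyRange lo hi 1).map F).sum =
        ((xs.zip xs.tail).map (fun ab => (ab.2 - ab.1) * F ab.1)).sum := by
  intro xs
  induction xs with
  | nil => intro _ lo hi hhead _ _; cases hhead
  | cons x t ih =>
    intro hp lo hi hhead hlast hconst
    have hlox : lo = x := by simpa using hhead.symm
    subst hlox
    cases t with
    | nil =>
      have hhix : hi = lo := by simpa using hlast.symm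
      subst hhix
      rw [PySem.List.pyRange_one_eq_nil le_rfl]
      rfl
    | cons y t' =>
      have hzip : (lo :: y :: t').zip (lo :: y :: t').tail =
          (lo, y) :: ((y :: t').zip t') := rfl
      have hxy : lo < y := (List.pairwise_cons.mp hp).1 y List.mem_cons_self
      have hlast' : (y :: t').getLast? = some hi := by
        rw [← List.getLast?_cons_cons (a := lo)]; exact hlast
      have hhim : hi ∈ y :: t' := List.mem_of_getLast? hlast'
      have hyhi : y ≤ hi := by
        rcases List.mem_cons.mp hhim with h | h
        · omega
        · have := (List.pairwise_cons.mp (List.pairwise_cons.mp hp).2).1 hi h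
          omega
      rw [PySem.List.pyRange_one_append lo y hi (by omega) hyhi]
      rw [List.map_append, List.sum_append]
      have hfirst : ((PySem.List.pyRange lo y).map F).sum = (y - lo) * F lo := by
        have hc : (PySem.List.pyRange lo y).map F =
            (PySem.List.pyRange lo y).map (fun _ => F lo) := by
          apply List.map_congr_left
          intro i hi'
          have := PySem.List.mem_pyRange_one.mp hi'
          exact hconst lo y (by rw [hzip]; exact List.mem_cons_self) i this.1 this.2
        rw [hc, PySem.List.sum_map_const_int, PySem.List.length_pyRange_one]
        congr 1
        omega
      have hrest := ih (List.pairwise_cons.mp hp).2 y hi rfl hlast'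
        (fun a b hab i h1 h2 => hconst a b (by rw [hzip]; exact List.mem_cons_of_mem _ hab) i h1 h2)
      simp only [List.tail_cons] at hrest
      rw [hfirst, hrest, hzip]
      rw [List.map_cons, List.sum_cons]

-- coverage of a cell is decided by the x-interval and y-interval separately
theorem pvCellCongr (instrs : List (Int × (Int × Int) × (Int × Int))) (i a c j : Int)
    (hx : ∀ ins ∈ instrs, (ins.2.1.1 ≤ i ∧ i ≤ ins.2.2.1) ↔ (ins.2.1.1 ≤ a ∧ a ≤ ins.2.2.1))
    (hy : ∀ ins ∈ instrs, (ins.2.1.2 ≤ c ∧ c ≤ ins.2.2.2) ↔ (ins.2.1.2 ≤ j ∧ j ≤ ins.2.2.2)) :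
    pvCell instrs i c = pvCell instrs a j := by
  unfold pvCell pvCellFrom
  apply PySem.List.foldl_congr_mem'
  intro ins hins acc
  have h1 := hx ins hins
  have h2 := hy ins hins
  have : (ins.2.1.1 ≤ i ∧ i ≤ ins.2.2.1 ∧ ins.2.1.2 ≤ c ∧ c ≤ ins.2.2.2) ↔
      (ins.2.1.1 ≤ a ∧ a ≤ ins.2.2.1 ∧ ins.2.1.2 ≤ j ∧ j ≤ ins.2.2.2) := by tauto
  rw [if_congr this rfl rfl]

-- a cell never covered by any admitted instruction keeps its initial value
theorem pvCellFrom_fixed :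
    ∀ (instrs : List (Int × (Int × Int) × (Int × Int))) (v i j : Int),
      (∀ ins ∈ instrs,
        ¬(ins.2.1.1 ≤ i ∧ i ≤ ins.2.2.1 ∧ ins.2.1.2 ≤ j ∧ j ≤ ins.2.2.2)) →
      pvCellFrom v instrs i j = v := by
  intro instrs
  induction instrs with
  | nil => intro v i j _; rfl
  | cons ins rest ih =>
    intro v i j h
    unfold pvCellFrom
    rw [List.foldl_cons, if_neg (h ins List.mem_cons_self)]
    exact ih v i j (fun x hx => h x (List.mem_cons_of_mem _ hx))

theorem pvCell_zero (instrs : List (Int × (Int × Int) × (Int × Int))) (h : Pre_solve instrs)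
    (i j : Int) (hout : i < 0 ∨ 1000 ≤ i ∨ j < 0 ∨ 1000 ≤ j) :
    pvCell instrs i j = 0 := by
  apply pvCellFrom_fixed
  intro ins hins
  rcases h ins hins with h' | h' | ⟨-, h'⟩ <;> intro hcv <;> omega

theorem lemB (instrs : List (Int × (Int × Int) × (Int × Int))) (h : Pre_solve instrs) :
    solve_alt instrs = pvGridSum instrs := by
  set bsx : List Int :=
    0 :: 1000 :: instrs.flatMap (fun ins => [ins.2.1.1, ins.2.2.1 + 1]) with hbsx
  set bsy : List Int :=
    0 :: 1000 :: instrs.flatMap (fun ins => [ins.2.1.2, ins.2.2.2 + 1]) with hbsy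
  set xs := PySem.List.sorted (PySem.Set.ofList bsx) (fun x => x) false with hxs
  set ys := PySem.List.sorted (PySem.Set.ofList bsy) (fun x => x) false with hys
  have hpx : xs.Pairwise (· < ·) := PySem.List.sorted_ofList_pairwise_lt bsx
  have hpy : ys.Pairwise (· < ·) := PySem.List.sorted_ofList_pairwise_lt bsy
  have hmemx : ∀ z : Int, z ∈ xs ↔ z ∈ bsx := by
    intro z; rw [hxs, PySem.List.mem_sorted, PySem.Set.mem_ofList]
  have hmemy : ∀ z : Int, z ∈ ys ↔ z ∈ bsy := by
    intro z; rw [hys, PySem.List.mem_sorted, PySem.Set.mem_ofList]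
  have h0x : (0 : Int) ∈ xs := (hmemx 0).mpr (by rw [hbsx]; exact List.mem_cons_self)
  have h1000x : (1000 : Int) ∈ xs :=
    (hmemx 1000).mpr (by rw [hbsx]; exact List.mem_cons_of_mem _ List.mem_cons_self)
  have h0y : (0 : Int) ∈ ys := (hmemy 0).mpr (by rw [hbsy]; exact List.mem_cons_self)
  have h1000y : (1000 : Int) ∈ ys :=
    (hmemy 1000).mpr (by rw [hbsy]; exact List.mem_cons_of_mem _ List.mem_cons_self)
  obtain ⟨hdx, hheadx, hhdx⟩ := pvHeadLe xs hpx 0 h0x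
  obtain ⟨lstx, hlastx, hlsx⟩ := pvLastGe xs hpx 1000 h1000x
  obtain ⟨hdy, hheady, hhdy⟩ := pvHeadLe ys hpy 0 h0y
  obtain ⟨lsty, hlasty, hlsy⟩ := pvLastGe ys hpy 1000 h1000y
  -- instruction breakpoints are members
  have hinsx : ∀ ins ∈ instrs, ins.2.1.1 ∈ xs ∧ ins.2.2.1 + 1 ∈ xs := by
    intro ins hins
    constructor
    · apply (hmemx _).mpr
      rw [hbsx]
      exact List.mem_cons_of_mem _ (List.mem_cons_of_mem _
        (List.mem_flatMap.mpr ⟨ins, hins, by simp⟩))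
    · apply (hmemx _).mpr
      rw [hbsx]
      exact List.mem_cons_of_mem _ (List.mem_cons_of_mem _
        (List.mem_flatMap.mpr ⟨ins, hins, by simp⟩))
  have hinsy : ∀ ins ∈ instrs, ins.2.1.2 ∈ ys ∧ ins.2.2.2 + 1 ∈ ys := by
    intro ins hins
    constructor
    · apply (hmemy _).mpr
      rw [hbsy]
      exact List.mem_cons_of_mem _ (List.mem_cons_of_mem _
        (List.mem_flatMap.mpr ⟨ins, hins, by simp⟩))
    · apply (hmemy _).mpr
      rw [hbsy]
      exact List.mem_cons_of_mem _ (List.mem_cons_of_mem _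
        (List.mem_flatMap.mpr ⟨ins, hins, by simp⟩))
  -- constancy of pvCell on blocks
  have hconstx : ∀ a b : Int, (a, b) ∈ xs.zip xs.tail → ∀ i : Int, a ≤ i → i < b →
      ∀ c : Int, pvCell instrs i c = pvCell instrs a c := by
    intro a b hab i h1 h2 c
    apply pvCellCongr
    · intro ins hins
      obtain ⟨m1, m2⟩ := hinsx ins hins
      have g1 := pvZipGap xs hpx a b hab _ m1
      have g2 := pvZipGap xs hpx a b hab _ m2
      omega
    · exact fun ins hins => Iff.rfl
  have hconsty : ∀ c d : Int, (c, d) ∈ ys.zip ys.tail → ∀ j : Int, c ≤ j → j < d →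
      ∀ a : Int, pvCell instrs a j = pvCell instrs a c := by
    intro c d hcd j h1 h2 a
    apply pvCellCongr
    · exact fun ins hins => Iff.rfl
    · intro ins hins
      obtain ⟨m1, m2⟩ := hinsy ins hins
      have g1 := pvZipGap ys hpy c d hcd _ m1
      have g2 := pvZipGap ys hpy c d hcd _ m2
      omega
  -- padding outside [0,1000) contributes nothing
  have hpadx : ∀ F : Int → Int, (∀ i : Int, i < 0 ∨ 1000 ≤ i → F i = 0) →
      ((PySem.List.pyRange hdx lstx 1).map F).sum = ((PySem.List.pyRange 0 1000 1).map F).sum := by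
    intro F hF
    rw [PySem.List.pyRange_one_append hdx 0 lstx (by omega) (by omega),
      PySem.List.pyRange_one_append 0 1000 lstx (by omega) (by omega)]
    rw [List.map_append, List.sum_append, List.map_append, List.sum_append]
    have hz1 : ((PySem.List.pyRange hdx 0).map F).sum = 0 := by
      apply List.sum_eq_zero
      intro x hx
      obtain ⟨i, hi, rfl⟩ := List.mem_map.mp hx
      exact hF i (Or.inl (PySem.List.mem_pyRange_one.mp hi).2)
    have hz2 : ((PySem.List.pyRange 1000 lstx).map F).sum = 0 := by
      apply List.sum_eq_zero
      intro x hx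
      obtain ⟨i, hi, rfl⟩ := List.mem_map.mp hx
      exact hF i (Or.inr (PySem.List.mem_pyRange_one.mp hi).1)
    rw [hz1, hz2]
    ring
  have hpady : ∀ F : Int → Int, (∀ j : Int, j < 0 ∨ 1000 ≤ j → F j = 0) →
      ((PySem.List.pyRange hdy lsty 1).map F).sum = ((PySem.List.pyRange 0 1000 1).map F).sum := by
    intro F hF
    rw [PySem.List.pyRange_one_append hdy 0 lsty (by omega) (by omega),
      PySem.List.pyRange_one_append 0 1000 lsty (by omega) (by omega)]
    rw [List.map_append, List.sum_append, List.map_append, List.sum_append]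
    have hz1 : ((PySem.List.pyRange hdy 0).map F).sum = 0 := by
      apply List.sum_eq_zero
      intro x hx
      obtain ⟨j, hj, rfl⟩ := List.mem_map.mp hx
      exact hF j (Or.inl (PySem.List.mem_pyRange_one.mp hj).2)
    have hz2 : ((PySem.List.pyRange 1000 lsty).map F).sum = 0 := by
      apply List.sum_eq_zero
      intro x hx
      obtain ⟨j, hj, rfl⟩ := List.mem_map.mp hx
      exact hF j (Or.inr (PySem.List.mem_pyRange_one.mp hj).1)
    rw [hz1, hz2]
    ring
  -- the double sum over the grid collapses to the block sums
  have step1 : pvGridSum instrs =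
      ((xs.zip xs.tail).map (fun ab => (ab.2 - ab.1) *
        ((PySem.List.pyRange 0 1000 1).map (fun j => pvCell instrs ab.1 j)).sum)).sum := by
    unfold pvGridSum
    rw [← hpadx (fun i => ((PySem.List.pyRange 0 1000 1).map (fun j => pvCell instrs i j)).sum)
      (by
        intro i hi
        apply List.sum_eq_zero
        intro x hx
        obtain ⟨j, hj, rfl⟩ := List.mem_map.mp hx
        exact pvCell_zero instrs h i j (by omega))]
    exact pvSumBlocks (fun i => ((PySem.List.pyRange 0 1000 1).map
        (fun j => pvCell instrs i j)).sum) xs hpx hdx lstx hheadx hlastx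
      (fun a b hab i h1 h2 => congrArg List.sum
        (List.map_congr_left (fun j _ => hconstx a b hab i h1 h2 j)))
  have step2 : ∀ a : Int,
      ((PySem.List.pyRange 0 1000 1).map (fun j => pvCell instrs a j)).sum =
        ((ys.zip ys.tail).map (fun cd => (cd.2 - cd.1) * pvCell instrs a cd.1)).sum := by
    intro a
    rw [← hpady (fun j => pvCell instrs a j)
      (fun j hj => pvCell_zero instrs h a j (by omega))]
    exact pvSumBlocks (fun j => pvCell instrs a j) ys hpy hdy lsty hheady hlasty
      (fun c d hcd j h1 h2 => hconsty c d hcd j h1 h2 a)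
  -- B's nested accumulator loops are the same block sums
  have lhs1 : solve_alt instrs =
      ((xs.zip xs.tail).map (fun ab => ((ys.zip ys.tail).map
        (fun cd => pvCell instrs ab.1 cd.1 * (ab.2 - ab.1) * (cd.2 - cd.1))).sum)).sum := by
    show (xs.zip xs.tail).foldl _ 0 = _
    have houter : (xs.zip xs.tail).foldl
        (fun total ab => (ys.zip ys.tail).foldl (fun total cd =>
          total + (instrs.foldl (fun v ins =>
            if ins.2.1.1 ≤ ab.1 ∧ ab.1 ≤ ins.2.2.1 ∧ ins.2.1.2 ≤ cd.1 ∧ cd.1 ≤ ins.2.2.2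
            then max 0 (v + pvDelta ins.1) else v) 0) * (ab.2 - ab.1) * (cd.2 - cd.1)) total) 0 =
        (xs.zip xs.tail).foldl (fun total ab => total + ((ys.zip ys.tail).map
          (fun cd => pvCell instrs ab.1 cd.1 * (ab.2 - ab.1) * (cd.2 - cd.1))).sum) 0 := by
      apply PySem.List.foldl_congr_mem'
      intro ab _ total
      exact PySem.List.foldl_add (ys.zip ys.tail)
        (fun cd => pvCell instrs ab.1 cd.1 * (ab.2 - ab.1) * (cd.2 - cd.1)) total
    rw [houter]
    rw [PySem.List.foldl_add (xs.zip xs.tail)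
      (fun ab => ((ys.zip ys.tail).map
        (fun cd => pvCell instrs ab.1 cd.1 * (ab.2 - ab.1) * (cd.2 - cd.1))).sum) 0]
    rw [zero_add]
  rw [lhs1, step1]
  refine congrArg List.sum (List.map_congr_left ?_)
  intro ab _
  rw [step2 ab.1, pvMulSum]
  refine congrArg List.sum (List.map_congr_left ?_)
  intro cd _
  ring

-- ===== VERDICT (by name: the statement is the Claim_ definition above) =====
theorem solve_spec : Claim_equal_solve := by
  intro instrs _ hpre
  unfold Spec_solve
  rw [lemA instrs hpre, lemB instrs hpre]
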